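-- pv_equiv track=rewrite | github.com/iclue-summer-2020/Newell-Littilewodd-Coefficient | partitionsin.py | partitionsin
-- ===== SOURCE A (Python) =====
-- def partitionsin(limit, size):
--   rsums = []
--   for e in limit:
--     rsums.append(e + (rsums[-1] if rsums else 0))
--   rsums.reverse()
--
--   def _p(parts, level, rem):
--     if rem == 0 and len(parts) <= len(limit):
--       yield parts
--       return
--
--     if rem < 0 or level >= len(limit) or rsums[level] < rem:
--       yield from ()
--       return
--
--     max_part = min(rem, limit[level], parts[-1] if parts else size)
--     for m in range(max_part+1):
--       yield from _p(parts + (m,), level+1, rem-m)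
--
--     yield from ()
--     return
--
--   return _p((), 0, size)
-- ===== SOURCE B (Python) =====
-- def partitionsin(limit, size):
--   rsums = []
--   for e in limit:
--     rsums.append(e + (rsums[-1] if rsums else 0))
--   rsums.reverse()
--
--   def _iter():
--     stack = [((), 0, size)]
--     while stack:
--       parts, level, rem = stack.pop()
--       if rem == 0 and len(parts) <= len(limit):
--         yield parts
--         continue
--       if rem < 0 or level >= len(limit) or rsums[level] < rem:
--         continue
--       max_part = min(rem, limit[level], parts[-1] if parts else size)
--       for m in range(max_part, -1, -1):
--         stack.append((parts + (m,), level + 1, rem - m))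
--
--   return _iter()
-- ===== Notes on version B (the rewrite author's own statement) =====
-- stated objective: alternative
-- what changed: The recursive generator _p is replaced by an iterative generator that runs a DFS with an explicit LIFO stack of (parts, level, rem) frames, pushing children in descending m so they pop in ascending order and reproduce the exact yield order.
import Mathlib
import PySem

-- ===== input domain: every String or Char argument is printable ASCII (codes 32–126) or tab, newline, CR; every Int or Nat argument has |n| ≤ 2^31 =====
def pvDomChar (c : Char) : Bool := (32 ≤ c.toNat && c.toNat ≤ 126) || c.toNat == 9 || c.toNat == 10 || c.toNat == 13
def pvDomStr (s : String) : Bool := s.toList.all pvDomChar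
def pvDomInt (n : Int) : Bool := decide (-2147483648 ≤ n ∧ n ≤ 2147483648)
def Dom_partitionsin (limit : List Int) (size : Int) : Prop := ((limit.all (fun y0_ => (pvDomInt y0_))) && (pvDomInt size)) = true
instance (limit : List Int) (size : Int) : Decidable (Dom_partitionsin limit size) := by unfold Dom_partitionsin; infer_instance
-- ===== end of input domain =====

-- B replaces A's recursive generator by an iterative explicit-stack DFS loop (same yield order); objective: alternative decomposition.
-- Both versions return a generator in Python; the ports materialise the yielded sequence as a list.

-- ===== PORT A =====
-- the shared first loop: rsums.append(e + (rsums[-1] if rsums else 0)); rsums.reverse()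
def pvRsums (limit : List Int) : List Int :=
  (limit.foldl (fun acc e => acc ++ [e + (acc.getLastD 0)]) []).reverse

-- A's inner recursive generator _p(parts, level, rem), transliterated (level is the Python int ≥ 0)
def partitionsinGo (limit rsums : List Int) (size : Int)
    (parts : List Int) (level : Nat) (rem : Int) : List (List Int) :=
  if rem = 0 ∧ parts.length ≤ limit.length then [parts]
  else if rem < 0 ∨ limit.length ≤ level ∨ PySem.List.pyGetD rsums (level : Int) 0 < rem then []
  else
    let max_part := min rem (min (PySem.List.pyGetD limit (level : Int) 0) (PySem.List.pyGetD parts (-1) size))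
    (PySem.List.pyRange 0 (max_part + 1) 1).flatMap
      (fun m => partitionsinGo limit rsums size (parts ++ [m]) (level + 1) (rem - m))
termination_by limit.length - level
decreasing_by omega

def partitionsin (limit : List Int) (size : Int) : List (List Int) :=
  partitionsinGo limit (pvRsums limit) size [] 0 size

-- ===== PORT B =====
-- weight used only for termination of the stack loop
def pvWt (L level : Nat) (rem : Int) : Nat := (rem.toNat + 2) ^ (L - level)

-- stated above the loop because its decreasing_by cites it
theorem pvWt_children_lt (L level : Nat) (rem mp : Int) (hl : level < L) (hr : 0 ≤ rem) (hmp : mp ≤ rem) :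
    ((PySem.List.pyRange mp (-1) (-1)).map (fun m => pvWt L (level + 1) (rem - m))).sum
      < pvWt L level rem := by
  have hk : L - level = (L - (level + 1)) + 1 := by omega
  have hbound : ∀ x ∈ (PySem.List.pyRange mp (-1) (-1)).map (fun m => pvWt L (level + 1) (rem - m)),
      x ≤ (rem.toNat + 2) ^ (L - (level + 1)) := by
    intro x hx
    simp only [List.mem_map] at hx
    obtain ⟨m, hm, rfl⟩ := hx
    rw [PySem.List.mem_pyRange_neg_one] at hm
    exact Nat.pow_le_pow_left (by omega) _
  have hlen : ((PySem.List.pyRange mp (-1) (-1)).map (fun m => pvWt L (level + 1) (rem - m))).length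
      ≤ rem.toNat + 1 := by
    simp [PySem.List.length_pyRange_neg_one]
    omega
  have hsum := List.sum_le_card_nsmul _ _ hbound
  rw [smul_eq_mul] at hsum
  have h1 : ((PySem.List.pyRange mp (-1) (-1)).map (fun m => pvWt L (level + 1) (rem - m))).sum
      ≤ (rem.toNat + 1) * (rem.toNat + 2) ^ (L - (level + 1)) :=
    le_trans hsum (Nat.mul_le_mul_right _ hlen)
  have hp : 0 < (rem.toNat + 2) ^ (L - (level + 1)) := Nat.pow_pos (by omega)
  have h2 : (rem.toNat + 1) * (rem.toNat + 2) ^ (L - (level + 1))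
      < (rem.toNat + 2) ^ ((L - (level + 1)) + 1) := by
    rw [pow_succ]
    nlinarith
  have hw : pvWt L level rem = (rem.toNat + 2) ^ ((L - (level + 1)) + 1) := by
    unfold pvWt; rw [hk]
  rw [hw]
  exact lt_of_le_of_lt h1 h2

-- B's while-loop over an explicit stack; children pushed in descending m so they pop ascending
def partitionsinLoop (limit rsums : List Int) (size : Int)
    (stack : List (List Int × Nat × Int)) (acc : List (List Int)) : List (List Int) :=
  match stack with
  | [] => acc
  | (parts, level, rem) :: rest =>
    if rem = 0 ∧ parts.length ≤ limit.length then
      partitionsinLoop limit rsums size rest (acc ++ [parts])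
    else if rem < 0 ∨ limit.length ≤ level ∨ PySem.List.pyGetD rsums (level : Int) 0 < rem then
      partitionsinLoop limit rsums size rest acc
    else
      let max_part := min rem (min (PySem.List.pyGetD limit (level : Int) 0) (PySem.List.pyGetD parts (-1) size))
      partitionsinLoop limit rsums size
        (((PySem.List.pyRange max_part (-1) (-1)).map
            (fun m => (parts ++ [m], level + 1, rem - m))).reverse ++ rest) acc
termination_by (stack.map (fun f => pvWt limit.length f.2.1 f.2.2)).sum
decreasing_by
  · have : 0 < pvWt limit.length level rem := Nat.pow_pos (by omega)
    simp; omega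
  · have : 0 < pvWt limit.length level rem := Nat.pow_pos (by omega)
    simp; omega
  · have h := pvWt_children_lt limit.length level rem
      (min rem (min (PySem.List.pyGetD limit (level : Int) 0) (PySem.List.pyGetD parts (-1) size)))
      (by omega) (by omega) (min_le_left _ _)
    simp only [List.map_append, List.sum_append, List.map_reverse, List.sum_reverse,
      List.map_map, List.map_cons, List.sum_cons, Function.comp_def] at h ⊢
    omega

def partitionsin_alt (limit : List Int) (size : Int) : List (List Int) :=
  partitionsinLoop limit (pvRsums limit) size [([], 0, size)] []

-- ===== PRECONDITION & SPEC =====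
def Spec_partitionsin (limit : List Int) (size : Int) (out : List (List Int)) : Prop := out = partitionsin_alt limit size
instance (limit : List Int) (size : Int) (out : List (List Int)) : Decidable (Spec_partitionsin limit size out) := by unfold Spec_partitionsin; infer_instance

-- ===== CLAIM (what is proved, stated in full; the proofs are below) =====
def Claim_equal_partitionsin : Prop := ∀ (limit : List Int) (size : Int), Dom_partitionsin limit size → Spec_partitionsin limit size (partitionsin limit size)

-- ===== LEMMAS AND PROOFS =====
theorem partitionsinLoop_eq (limit rsums : List Int) (size : Int)
    (stack : List (List Int × Nat × Int)) (acc : List (List Int)) :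
    partitionsinLoop limit rsums size stack acc
      = acc ++ stack.flatMap (fun f => partitionsinGo limit rsums size f.1 f.2.1 f.2.2) := by
  induction stack, acc using partitionsinLoop.induct limit rsums size with
  | case1 acc => simp [partitionsinLoop]
  | case2 acc parts level rem rest h ih =>
    rw [partitionsinLoop, if_pos h, ih]
    simp only [List.flatMap_cons]
    conv_rhs => rw [partitionsinGo.eq_def]
    rw [if_pos h]
    simp
  | case3 acc parts level rem rest h1 h2 ih =>
    rw [partitionsinLoop, if_neg h1, if_pos h2, ih]
    simp only [List.flatMap_cons]
    conv_rhs => rw [partitionsinGo.eq_def]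
    rw [if_neg h1, if_pos h2]
    simp
  | case4 acc parts level rem rest h1 h2 mp ih =>
    rw [partitionsinLoop, if_neg h1, if_neg h2, ih]
    simp only [List.flatMap_cons]
    conv_rhs => rw [partitionsinGo.eq_def]
    rw [if_neg h1, if_neg h2]
    rw [PySem.List.pyRange_neg_one_eq_reverse]
    have hmp : mp = min rem (min (PySem.List.pyGetD limit (level : Int) 0) (PySem.List.pyGetD parts (-1) size)) := rfl
    rw [hmp]
    simp [List.flatMap_append, List.flatMap_map]

theorem partitionsin_spec' (limit : List Int) (size : Int) :
    partitionsin limit size = partitionsin_alt limit size := by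
  rw [partitionsin, partitionsin_alt, partitionsinLoop_eq]
  simp

-- ===== VERDICT (by name: the statement is the Claim_ definition above) =====
theorem partitionsin_spec : Claim_equal_partitionsin := by
  intro limit size _
  unfold Spec_partitionsin
  exact partitionsin_spec' limit size
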